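-- pv_equiv track=rewrite | github.com/wowonjin/nova_ai_landing | nova-ai/script_runner.py | _normalize_box_template_order
-- ===== SOURCE A (Python) =====
-- from typing import Callable, Dict, List
--
-- def _normalize_box_template_order(lines: List[str]) -> List[str]:
--     """
--     When box.hwp is used, ensure focus_placeholder('@@@') appears
--     immediately after insert_template('box.hwp').
--     """
--     out: List[str] = []
--     i = 0
--     while i < len(lines):
--         line = lines[i]
--         stripped = line.strip()
--         if stripped.startswith("insert_template(") and "box.hwp" in stripped:
--             out.append(line)
--             # Skip any existing @@@ right after; reinsert if missing.
--             j = i + 1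
--             while j < len(lines) and not lines[j].strip():
--                 out.append(lines[j])
--                 j += 1
--             if j < len(lines) and lines[j].strip() in (
--                 "focus_placeholder('@@@')",
--                 'focus_placeholder("@@@")',
--             ):
--                 out.append(lines[j])
--                 i = j + 1
--                 continue
--             out.append("focus_placeholder('@@@')")
--             i = j
--             continue
--         if stripped in ("focus_placeholder('@@@')", 'focus_placeholder("@@@")'):
--             # If @@@ appears before box.hwp, drop it (will be reinserted after template).
--             if any(
--                 l.strip().startswith("insert_template(") and "box.hwp" in l
--                 for l in lines[i + 1 :]
--             ):
--                 i += 1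
--                 continue
--         out.append(line)
--         i += 1
--     return out
-- ===== SOURCE B (Python) =====
-- from typing import List
--
-- _PLS = ("focus_placeholder('@@@')", 'focus_placeholder("@@@")')
--
--
-- def _is_box(s: str) -> bool:
--     t = s.strip()
--     return t.startswith("insert_template(") and "box.hwp" in t
--
--
-- def _normalize_box_template_order(lines: List[str]) -> List[str]:
--     n = len(lines)
--     # after[i] == True iff some box.hwp insert_template line exists in lines[i:]
--     after = [False] * (n + 1)
--     for i in range(n - 1, -1, -1):
--         after[i] = after[i + 1] or _is_box(lines[i])
--
--     out: List[str] = []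
--     pending = False  # a box line was emitted and its placeholder not yet resolved
--     for i, line in enumerate(lines):
--         s = line.strip()
--         if pending:
--             if not s:
--                 out.append(line)
--                 continue
--             if s in _PLS:
--                 out.append(line)
--                 pending = False
--                 continue
--             out.append("focus_placeholder('@@@')")
--             pending = False
--         if _is_box(line):
--             out.append(line)
--             pending = True
--         elif s in _PLS and after[i + 1]:
--             pass  # dropped; it will be re-inserted after the coming box line
--         else:
--             out.append(line)
--     if pending:
--         out.append("focus_placeholder('@@@')")
--     return out
-- ===== Notes on version B (the rewrite author's own statement) =====
-- stated objective: alternative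
-- what changed: A walks an index with an inner blank-skipping lookahead loop and rescans the whole tail (any(...)) for every placeholder line; B precomputes a suffix 'box follows' flag array in one backward pass and then emits lines in a single forward pass driven by a 'pending placeholder' state flag.
import Mathlib
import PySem

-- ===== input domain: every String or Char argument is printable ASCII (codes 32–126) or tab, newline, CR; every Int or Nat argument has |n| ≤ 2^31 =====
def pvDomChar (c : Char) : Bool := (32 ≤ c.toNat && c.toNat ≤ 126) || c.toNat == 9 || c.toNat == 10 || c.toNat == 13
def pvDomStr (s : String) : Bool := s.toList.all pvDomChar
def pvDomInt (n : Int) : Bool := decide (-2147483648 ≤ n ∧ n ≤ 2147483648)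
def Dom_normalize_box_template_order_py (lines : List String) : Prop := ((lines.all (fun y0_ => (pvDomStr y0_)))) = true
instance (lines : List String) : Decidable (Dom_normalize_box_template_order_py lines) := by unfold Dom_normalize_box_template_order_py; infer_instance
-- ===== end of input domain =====

-- B replaces A's index loop with inner lookahead scans by a precomputed suffix flag array plus a
-- single forward pass carrying a 'pending placeholder' state flag (alternative decomposition, same values).

-- ===== PORT A =====
-- helper: `stripped in ("focus_placeholder('@@@')", 'focus_placeholder("@@@")')`
def pvA_isPH (s : String) : Bool :=
  s == "focus_placeholder('@@@')" || s == "focus_placeholder(\"@@@\")"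

-- inner while loop: `while j < len(lines) and not lines[j].strip(): out.append(lines[j]); j += 1`
-- (returns the blank lines appended by the inner loop together with the final j)
def pvA_collect (lines : List String) (j : Nat) : List String × Nat :=
  if h : j < lines.length then
    if PySem.Str.strip lines[j] == "" then
      (lines[j] :: (pvA_collect lines (j + 1)).1, (pvA_collect lines (j + 1)).2)
    else ([], j)
  else ([], j)
termination_by lines.length - j
decreasing_by exact Nat.sub_succ_lt_self _ _ h

-- needed by pvA_loop's termination: the inner loop never moves j backwards
theorem pvA_collect_ge (lines : List String) (j : Nat) : j ≤ (pvA_collect lines j).2 := by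
  rw [pvA_collect]
  by_cases h : j < lines.length
  · rw [dif_pos h]
    by_cases hb : (PySem.Str.strip lines[j] == "") = true
    · rw [if_pos hb]
      exact Nat.le_of_succ_le (pvA_collect_ge lines (j + 1))
    · rw [if_neg hb]
  · rw [dif_neg h]
termination_by lines.length - j
decreasing_by exact Nat.sub_succ_lt_self _ _ h

-- the outer `while i < len(lines)` loop; `out.append` becomes building the list in order
def pvA_loop (lines : List String) (i : Nat) : List String :=
  if h : i < lines.length then
    if PySem.Str.startswith (PySem.Str.strip lines[i]) "insert_template(" &&
        PySem.Str.isIn "box.hwp" (PySem.Str.strip lines[i]) then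
      if hj : (pvA_collect lines (i + 1)).2 < lines.length then
        if pvA_isPH (PySem.Str.strip lines[(pvA_collect lines (i + 1)).2]) then
          lines[i] :: ((pvA_collect lines (i + 1)).1 ++
            lines[(pvA_collect lines (i + 1)).2] :: pvA_loop lines ((pvA_collect lines (i + 1)).2 + 1))
        else
          lines[i] :: ((pvA_collect lines (i + 1)).1 ++
            "focus_placeholder('@@@')" :: pvA_loop lines (pvA_collect lines (i + 1)).2)
      else
        lines[i] :: ((pvA_collect lines (i + 1)).1 ++
          "focus_placeholder('@@@')" :: pvA_loop lines (pvA_collect lines (i + 1)).2)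
    else if pvA_isPH (PySem.Str.strip lines[i]) && (lines.drop (i + 1)).any   -- lines[i+1:] (i+1 ≥ 0: the slice is a drop)
        (fun l => PySem.Str.startswith (PySem.Str.strip l) "insert_template(" && PySem.Str.isIn "box.hwp" l) then
      pvA_loop lines (i + 1)
    else
      lines[i] :: pvA_loop lines (i + 1)
  else []
termination_by lines.length - i
decreasing_by
  · exact Nat.sub_lt_sub_left h (Nat.lt_succ_of_lt (pvA_collect_ge lines (i + 1)))
  · exact Nat.sub_lt_sub_left h (pvA_collect_ge lines (i + 1))
  · exact Nat.sub_lt_sub_left h (pvA_collect_ge lines (i + 1))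
  · exact Nat.sub_succ_lt_self _ _ h
  · exact Nat.sub_succ_lt_self _ _ h

def normalize_box_template_order_py (lines : List String) : List String := pvA_loop lines 0

-- ===== PORT B =====
def pvB_isPH (s : String) : Bool :=
  s == "focus_placeholder('@@@')" || s == "focus_placeholder(\"@@@\")"

-- B's _is_box (t = s.strip())
def pvB_isBox (s : String) : Bool :=
  PySem.Str.startswith (PySem.Str.strip s) "insert_template(" &&
    PySem.Str.isIn "box.hwp" (PySem.Str.strip s)

-- B's backward loop building `after` (after[i] ⇔ a box line exists in lines[i:]); length n+1
def pvB_after : List String → List Bool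
  | [] => [false]
  | l :: rest =>
    let r := pvB_after rest
    (pvB_isBox l || r.headD false) :: r

-- B's forward pass; `aft` is the suffix of the `after` array aligned with the remaining lines,
-- so `aft.tail.headD false` is Python's `after[i + 1]`
def pvB_run : List String → List Bool → Bool → List String
  | [], _, pending => if pending then ["focus_placeholder('@@@')"] else []
  | l :: rest, aft, pending =>
    if pending then
      if PySem.Str.strip l == "" then l :: pvB_run rest aft.tail true
      else if pvB_isPH (PySem.Str.strip l) then l :: pvB_run rest aft.tail false
      else "focus_placeholder('@@@')" ::
        (if pvB_isBox l then l :: pvB_run rest aft.tail true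
         else if pvB_isPH (PySem.Str.strip l) && aft.tail.headD false then pvB_run rest aft.tail false
         else l :: pvB_run rest aft.tail false)
    else
      if pvB_isBox l then l :: pvB_run rest aft.tail true
      else if pvB_isPH (PySem.Str.strip l) && aft.tail.headD false then pvB_run rest aft.tail false
      else l :: pvB_run rest aft.tail false

def normalize_box_template_order_py_alt (lines : List String) : List String :=
  pvB_run lines (pvB_after lines) false

-- ===== PRECONDITION & SPEC =====
def Spec_normalize_box_template_order_py (lines : List String) (out : List String) : Prop := out = normalize_box_template_order_py_alt lines
instance (lines : List String) (out : List String) : Decidable (Spec_normalize_box_template_order_py lines out) := by unfold Spec_normalize_box_template_order_py; infer_instance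

-- ===== CLAIM (what is proved, stated in full; the proofs are below) =====
def Claim_equal_normalize_box_template_order_py : Prop := ∀ (lines : List String), Dom_normalize_box_template_order_py lines → Spec_normalize_box_template_order_py lines (normalize_box_template_order_py lines)

-- ===== LEMMAS AND PROOFS =====

-- `not line.strip()`
def pvBlank (l : String) : Bool := PySem.Str.strip l == ""

-- common normal form: A's algorithm as structural recursion on the remaining suffix
-- (pvPost is the state right after a box line was emitted: walk blanks, then keep or insert the placeholder)
mutual
def pvASuf : List String → List String
  | [] => []
  | l :: rest =>
    if pvB_isBox l then l :: pvPost rest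
    else if pvB_isPH (PySem.Str.strip l) && rest.any pvB_isBox then pvASuf rest
    else l :: pvASuf rest
  termination_by ls => (ls.length, 0)
def pvPost : List String → List String
  | [] => ["focus_placeholder('@@@')"]
  | l :: rest =>
    if pvBlank l then l :: pvPost rest
    else if pvB_isPH (PySem.Str.strip l) then l :: pvASuf rest
    else "focus_placeholder('@@@')" :: pvASuf (l :: rest)
  termination_by ls => (ls.length, 1)
end

theorem pvASuf_nil : pvASuf [] = [] := by rw [pvASuf]

theorem pvASuf_cons (l : String) (rest : List String) :
    pvASuf (l :: rest) =
      if pvB_isBox l then l :: pvPost rest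
      else if pvB_isPH (PySem.Str.strip l) && rest.any pvB_isBox then pvASuf rest
      else l :: pvASuf rest := by
  rw [pvASuf]

theorem pvPost_nil : pvPost [] = ["focus_placeholder('@@@')"] := by rw [pvPost]

theorem pvPost_cons (l : String) (rest : List String) :
    pvPost (l :: rest) =
      if pvBlank l then l :: pvPost rest
      else if pvB_isPH (PySem.Str.strip l) then l :: pvASuf rest
      else "focus_placeholder('@@@')" :: pvASuf (l :: rest) := by
  rw [pvPost]

-- pvPost in closed blank-prefix form (used to meet A's inner loop)
def pvPostTail : List String → List String
  | [] => ["focus_placeholder('@@@')"]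
  | x :: xs =>
    if pvB_isPH (PySem.Str.strip x) then x :: pvASuf xs
    else "focus_placeholder('@@@')" :: pvASuf (x :: xs)

theorem pvPost_eq_tail : ∀ ls : List String,
    pvPost ls = ls.takeWhile pvBlank ++ pvPostTail (ls.dropWhile pvBlank) := by
  intro ls
  induction ls with
  | nil => rw [pvPost_nil]; rfl
  | cons l rest ih =>
    rw [pvPost_cons, List.takeWhile_cons, List.dropWhile_cons]
    by_cases hb : pvBlank l = true
    · rw [if_pos hb, if_pos hb, if_pos hb, ih]; simp
    · rw [if_neg hb, if_neg hb, if_neg hb]; simp [pvPostTail]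

-- a substring without whitespace survives dropping leading whitespace
theorem pv_nospace_infix_dropWhile (sub : List Char) (hne : sub ≠ [])
    (hns : ∀ c ∈ sub, PySem.Chars.isspace c = false) :
    ∀ cs : List Char, sub <:+: cs → sub <:+: cs.dropWhile PySem.Chars.isspace := by
  intro cs h
  induction cs with
  | nil => exact absurd (List.infix_nil.mp h) hne
  | cons c rest ih =>
    by_cases hc : PySem.Chars.isspace c = true
    · rw [List.dropWhile_cons_of_pos hc]
      rcases List.infix_cons_iff.mp h with hp | hi
      · match sub, hne, hns, hp with
        | s0 :: s1, _, hns, hp =>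
          have h0 : s0 = c := (List.cons_prefix_cons.mp hp).1
          have hf := hns s0 (List.mem_cons_self ..)
          rw [h0] at hf; rw [hf] at hc; cases hc
      · exact ih hi
    · rw [List.dropWhile_cons_of_neg hc]; exact h

-- ... and survives strip entirely (both directions)
theorem pv_infix_strip_iff (sub : List Char) (hne : sub ≠ [])
    (hns : ∀ c ∈ sub, PySem.Chars.isspace c = false) (cs : List Char) :
    sub <:+: PySem.Chars.strip cs ↔ sub <:+: cs := by
  constructor
  · intro h
    have h1 : PySem.Chars.strip cs <:+: cs := by
      unfold PySem.Chars.strip PySem.Chars.rstrip PySem.Chars.lstrip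
      have hA : (List.dropWhile PySem.Chars.isspace
          (List.dropWhile PySem.Chars.isspace cs).reverse).reverse <+:
          List.dropWhile PySem.Chars.isspace cs := by
        rw [← List.reverse_suffix]
        simpa using List.dropWhile_suffix (p := PySem.Chars.isspace)
          (l := (List.dropWhile PySem.Chars.isspace cs).reverse)
      exact hA.isInfix.trans (List.dropWhile_suffix _).isInfix
    exact h.trans h1
  · intro h
    unfold PySem.Chars.strip PySem.Chars.rstrip PySem.Chars.lstrip
    have hns' : ∀ c ∈ sub.reverse, PySem.Chars.isspace c = false := by
      intro c hcm; exact hns c (List.mem_reverse.mp hcm)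
    have hne' : sub.reverse ≠ [] := by simpa using hne
    have h2 := pv_nospace_infix_dropWhile sub hne hns cs h
    have h3 : sub.reverse <:+: (List.dropWhile PySem.Chars.isspace cs).reverse :=
      List.reverse_infix.mpr h2
    have h4 := pv_nospace_infix_dropWhile sub.reverse hne' hns' _ h3
    have h5 := List.reverse_infix.mpr h4
    simpa using h5

theorem pv_isIn_box_strip (s : String) :
    PySem.Str.isIn "box.hwp" (PySem.Str.strip s) = PySem.Str.isIn "box.hwp" s := by
  have htl : "box.hwp".toList = ['b','o','x','.','h','w','p'] := by rfl
  have hne : "box.hwp".toList ≠ [] := by rw [htl]; simp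
  have hns : ∀ c ∈ ("box.hwp".toList), PySem.Chars.isspace c = false := by
    rw [htl]; intro c hc; fin_cases hc <;> rfl
  have h1 := PySem.Str.isIn_iff_infix "box.hwp" (PySem.Str.strip s)
  have h2 := PySem.Str.isIn_iff_infix "box.hwp" s
  have h3 := pv_infix_strip_iff "box.hwp".toList hne hns s.toList
  rw [PySem.Str.toList_strip] at h1
  rw [Bool.eq_iff_iff, h1, h2]
  exact h3

-- A's `any(...)` predicate (raw `"box.hwp" in l`) agrees with B's _is_box (stripped line)
theorem pv_anyBox_eq (ls : List String) :
    (ls.any (fun l => PySem.Str.startswith (PySem.Str.strip l) "insert_template(" &&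
        PySem.Str.isIn "box.hwp" l)) = ls.any pvB_isBox := by
  apply PySem.List.any_congr_mem
  intro x _
  simp only [pvB_isBox]
  rw [pv_isIn_box_strip]

-- the inner blank-collecting loop is takeWhile on the suffix
theorem pv_collect_eq : ∀ (n : Nat) (lines : List String) (j : Nat), lines.length - j ≤ n →
    pvA_collect lines j =
      ((lines.drop j).takeWhile pvBlank, j + ((lines.drop j).takeWhile pvBlank).length) := by
  intro n
  induction n with
  | zero =>
    intro lines j hle
    have hge : lines.length ≤ j := by omega
    rw [pvA_collect, dif_neg (by omega)]
    rw [List.drop_eq_nil_of_le hge]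
    simp
  | succ n ih =>
    intro lines j hle
    by_cases h : j < lines.length
    · have hdj : lines.drop j = lines[j] :: lines.drop (j + 1) := (List.getElem_cons_drop h).symm
      rw [pvA_collect, dif_pos h, hdj, List.takeWhile_cons]
      rw [show (PySem.Str.strip lines[j] == "") = pvBlank lines[j] from rfl]
      cases hb : pvBlank lines[j]
      · rw [if_neg (by simp), if_neg (by simp)]
        simp
      · rw [if_pos rfl, if_pos rfl, ih lines (j + 1) (by omega)]
        refine Prod.ext rfl ?_
        simp; omega
    · have hge : lines.length ≤ j := by omega
      rw [pvA_collect, dif_neg (by omega)]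
      rw [List.drop_eq_nil_of_le hge]
      simp

theorem pv_drop_takeWhile_length (p : String → Bool) (l : List String) :
    l.drop (l.takeWhile p).length = l.dropWhile p := by
  induction l with
  | nil => rfl
  | cons a l ih =>
    rw [List.takeWhile_cons, List.dropWhile_cons]
    cases hp : p a <;> simp [ih]

theorem pv_drop_collect (lines : List String) (j : Nat) :
    lines.drop (pvA_collect lines j).2 = (lines.drop j).dropWhile pvBlank := by
  rw [pv_collect_eq (lines.length - j) lines j (by omega)]
  rw [← List.drop_drop, pv_drop_takeWhile_length]

-- bridge: A's index loop computes the suffix normal form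
theorem pvA_eq_suf : ∀ (n : Nat) (lines : List String) (i : Nat), lines.length - i ≤ n →
    pvA_loop lines i = pvASuf (lines.drop i) := by
  intro n
  induction n with
  | zero =>
    intro lines i hle
    rw [pvA_loop, dif_neg (by omega)]
    rw [List.drop_eq_nil_of_le (by omega), pvASuf_nil]
  | succ n ih =>
    intro lines i hle
    by_cases h : i < lines.length
    · have hdi : lines.drop i = lines[i] :: lines.drop (i + 1) := (List.getElem_cons_drop h).symm
      rw [pvA_loop, dif_pos h, hdi, pvASuf_cons]
      rw [show (PySem.Str.startswith (PySem.Str.strip lines[i]) "insert_template(" &&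
          PySem.Str.isIn "box.hwp" (PySem.Str.strip lines[i])) = pvB_isBox lines[i] from rfl]
      by_cases hbx : pvB_isBox lines[i] = true
      · rw [if_pos hbx, if_pos hbx, pvPost_eq_tail]
        have hc1 : (pvA_collect lines (i + 1)).1 = (lines.drop (i + 1)).takeWhile pvBlank := by
          rw [pv_collect_eq (lines.length - (i + 1)) lines (i + 1) (by omega)]
        have hge2 := pvA_collect_ge lines (i + 1)
        have hdc := pv_drop_collect lines (i + 1)
        rcases hdw : (lines.drop (i + 1)).dropWhile pvBlank with _ | ⟨x, xs⟩
        · -- no non-blank follower: j runs to the end of the file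
          rw [hdw] at hdc
          have hlen : lines.length ≤ (pvA_collect lines (i + 1)).2 := by
            by_contra hlt
            have hpos : lines.drop (pvA_collect lines (i + 1)).2 ≠ [] := by
              apply List.ne_nil_of_length_pos
              simp; omega
            exact hpos hdc
          rw [dif_neg (by omega)]
          rw [ih lines (pvA_collect lines (i + 1)).2 (by omega), hdc, pvASuf_nil, hc1]
          rfl
        · -- a non-blank follower exists at index j
          rw [hdw] at hdc
          have hne : lines.drop (pvA_collect lines (i + 1)).2 ≠ [] := by rw [hdc]; simp
          have hj : (pvA_collect lines (i + 1)).2 < lines.length := by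
            by_contra hge
            exact hne (List.drop_eq_nil_of_le (by omega))
          have hcons : lines[(pvA_collect lines (i + 1)).2] ::
              lines.drop ((pvA_collect lines (i + 1)).2 + 1) = x :: xs := by
            rw [List.getElem_cons_drop hj, hdc]
          injection hcons with hx hxs
          rw [dif_pos hj, hx, hc1]
          simp only [pvPostTail]
          rw [show pvA_isPH (PySem.Str.strip x) = pvB_isPH (PySem.Str.strip x) from rfl]
          by_cases hph : pvB_isPH (PySem.Str.strip x) = true
          · rw [if_pos hph, if_pos hph]
            rw [ih lines ((pvA_collect lines (i + 1)).2 + 1) (by omega), hxs]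
          · rw [if_neg hph, if_neg hph]
            rw [ih lines (pvA_collect lines (i + 1)).2 (by omega), hdc]
      · rw [if_neg hbx, if_neg hbx]
        rw [show pvA_isPH (PySem.Str.strip lines[i]) = pvB_isPH (PySem.Str.strip lines[i]) from rfl]
        rw [pv_anyBox_eq]
        by_cases hph : (pvB_isPH (PySem.Str.strip lines[i]) && (lines.drop (i + 1)).any pvB_isBox) = true
        · rw [if_pos hph, if_pos hph, ih lines (i + 1) (by omega)]
        · rw [if_neg hph, if_neg hph, ih lines (i + 1) (by omega)]
    · rw [pvA_loop, dif_neg (by omega)]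
      rw [List.drop_eq_nil_of_le (by omega), pvASuf_nil]

theorem pvB_after_cons (l : String) (rest : List String) :
    pvB_after (l :: rest) = (pvB_isBox l || (pvB_after rest).headD false) :: pvB_after rest := rfl

theorem pv_after_head (ls : List String) : (pvB_after ls).headD false = ls.any pvB_isBox := by
  induction ls with
  | nil => rfl
  | cons l rest ih => rw [pvB_after_cons, List.headD_cons, ih, List.any_cons]

-- bridge: B's state machine computes the same normal form
theorem pvB_eq : ∀ (n : Nat) (lines : List String), lines.length ≤ n →
    pvB_run lines (pvB_after lines) false = pvASuf lines ∧
    pvB_run lines (pvB_after lines) true = pvPost lines := by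
  intro n
  induction n with
  | zero =>
    intro lines hle
    have hnil : lines = [] := List.eq_nil_of_length_eq_zero (by omega)
    subst hnil
    constructor <;> simp [pvB_run, pvPost_nil, pvASuf_nil]
  | succ n ih =>
    intro lines hle
    rcases lines with _ | ⟨l, rest⟩
    · constructor <;> simp [pvB_run, pvPost_nil, pvASuf_nil]
    · have hlen : rest.length ≤ n := by simpa using hle
      obtain ⟨ihF, ihT⟩ := ih rest hlen
      have hnorm : (if pvB_isBox l = true then l :: pvB_run rest (pvB_after rest) true
          else if (pvB_isPH (PySem.Str.strip l) && (pvB_after rest).headD false) = true then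
            pvB_run rest (pvB_after rest) false
          else l :: pvB_run rest (pvB_after rest) false) = pvASuf (l :: rest) := by
        rw [pvASuf_cons, pv_after_head]
        by_cases hbx : pvB_isBox l = true
        · rw [if_pos hbx, if_pos hbx, ihT]
        · rw [if_neg hbx, if_neg hbx]
          by_cases hph : (pvB_isPH (PySem.Str.strip l) && rest.any pvB_isBox) = true
          · rw [if_pos hph, if_pos hph, ihF]
          · rw [if_neg hph, if_neg hph, ihF]
      constructor
      · rw [pvB_run, pvB_after_cons]
        simp only [List.tail_cons]
        rw [if_neg (by simp)]
        exact hnorm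
      · rw [pvB_run, pvB_after_cons]
        simp only [List.tail_cons]
        rw [if_pos trivial, pvPost_cons]
        rw [show (PySem.Str.strip l == "") = pvBlank l from rfl]
        by_cases hb : pvBlank l = true
        · rw [if_pos hb, if_pos hb, ihT]
        · rw [if_neg hb, if_neg hb]
          by_cases hph : pvB_isPH (PySem.Str.strip l) = true
          · rw [if_pos hph, if_pos hph, ihF]
          · rw [if_neg hph, if_neg hph]
            exact congrArg _ hnorm

-- ===== VERDICT (by name: the statement is the Claim_ definition above) =====
theorem normalize_box_template_order_py_spec : Claim_equal_normalize_box_template_order_py := by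
  intro lines _
  unfold Spec_normalize_box_template_order_py normalize_box_template_order_py normalize_box_template_order_py_alt
  rw [pvA_eq_suf lines.length lines 0 (by omega)]
  rw [(pvB_eq lines.length lines (le_refl _)).1, List.drop_zero]
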